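-- pv_equiv track=rewrite | github.com/kmilewczyk96/Codewars_Python | 6kyu/backwards_read_primes.py | backwards_prime
-- ===== SOURCE A (Python) =====
-- def backwards_prime(start, stop):
--     if start % 2 == 0:
--         start += 1
--
--     my_list = []
--
--     def is_prime(x):
--         for i in range(2, x//2):
--             if x % i == 0:
--                 return False
--         return True
--
--     for number in range(start, stop + 1, 2):
--         if str(number).startswith(('2', '4', '5', '6', '8')):
--             pass
--         else:
--             if is_prime(number):
--                 reverse = int(str(number)[::-1])
--                 if number != reverse:
--                     if is_prime(reverse):
--                         my_list.append(number)
--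
--     return my_list
-- ===== SOURCE B (Python) =====
-- def backwards_prime(start, stop):
--     if start % 2 == 0:
--         start += 1
--
--     def looks_prime(x):
--         # same verdicts as a trial scan over range(2, x//2):
--         # that scan is empty for x < 6, evens >= 6 are caught by 2,
--         # odd composites by an odd divisor d with d*d <= x
--         if x < 6:
--             return True
--         if x % 2 == 0:
--             return False
--         d = 3
--         while d * d <= x:
--             if x % d == 0:
--                 return False
--             d += 2
--         return True
--
--     out = []
--     for n in range(start, stop + 1, 2):
--         s = str(n)
--         if s[0] in '24568':
--             continue
--         r = int(s[::-1])
--         if r != n and looks_prime(n) and looks_prime(r):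
--             out.append(n)
--     return out
-- ===== Notes on version B (the rewrite author's own statement) =====
-- stated objective: alternative
-- what changed: B replaces A's per-number trial division over range(2, x//2) by a parity-split trial division (check 2 via x%2, then only odd divisors d with d*d <= x) with identical verdicts, and replaces the startswith-tuple skip by a single first-character test, with the reversal check hoisted before the primality tests.
import Mathlib
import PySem

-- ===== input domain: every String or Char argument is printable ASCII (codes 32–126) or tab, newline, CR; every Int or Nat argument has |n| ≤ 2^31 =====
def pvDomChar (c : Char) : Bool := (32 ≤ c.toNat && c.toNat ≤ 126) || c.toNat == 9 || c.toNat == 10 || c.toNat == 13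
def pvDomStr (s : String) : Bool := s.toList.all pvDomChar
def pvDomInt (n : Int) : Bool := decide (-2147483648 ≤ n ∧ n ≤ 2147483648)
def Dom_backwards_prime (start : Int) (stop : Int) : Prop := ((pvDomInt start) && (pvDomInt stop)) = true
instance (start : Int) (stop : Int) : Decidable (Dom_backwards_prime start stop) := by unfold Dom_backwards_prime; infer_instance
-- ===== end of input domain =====

-- B replaces A's trial scan over range(2, x//2) by a parity-split trial division bounded
-- by d*d <= x with the same verdicts, and tests the first character instead of a startswith tuple.

-- x % 2 etc. with a positive literal divisor (instantiation of PySem.Int.mod_eq_emod_of_pos)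
theorem bp_mod_pos (a b : Int) (hb : 0 < b) : PySem.Int.mod a b = a % b :=
  PySem.Int.mod_eq_emod_of_pos hb

-- ===== PORT A =====
-- A's nested helper is_prime: for i in range(2, x//2): if x % i == 0: return False; return True
def bpIsPrimeA (x : Int) : Bool :=
  (PySem.List.pyRange 2 (PySem.Int.floordiv x 2) 1).all (fun i => !(PySem.Int.mod x i == 0))

def backwards_prime (start : Int) (stop : Int) : List Int :=
  let start' := if PySem.Int.mod start 2 == 0 then start + 1 else start
  (PySem.List.pyRange start' (stop + 1) 2).foldl (fun my_list number =>
    -- str(number).startswith(('2', '4', '5', '6', '8')) : any-of-prefixes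
    if PySem.Str.startswith (PySem.Int.toStr number) "2"
        || PySem.Str.startswith (PySem.Int.toStr number) "4"
        || PySem.Str.startswith (PySem.Int.toStr number) "5"
        || PySem.Str.startswith (PySem.Int.toStr number) "6"
        || PySem.Str.startswith (PySem.Int.toStr number) "8" then
      my_list  -- pass
    else
      if bpIsPrimeA number then
        match PySem.Str.slice? (PySem.Int.toStr number) none none (-1) with
        | none => my_list  -- unreachable (step -1 ≠ 0)
        | some rs =>
          match PySem.Int.ofStr? rs with
          | none => my_list  -- int() raises ValueError here; outside Pre_
          | some reverse =>
            if number ≠ reverse then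
              (if bpIsPrimeA reverse then my_list ++ [number] else my_list)
            else my_list
      else my_list) []

-- ===== PORT B =====
-- B's while d * d <= x: if x % d == 0: return False; d += 2; ... return True
def bpTrialAlt (x : Int) (d : Int) : Bool :=
  if d * d ≤ x then
    (if PySem.Int.mod x d = 0 then false else bpTrialAlt x (d + 2))
  else true
termination_by (x - d).toNat
decreasing_by
  rename_i hdx hmod
  have h1 : (1 : Int) ≤ x - d := by
    rcases lt_trichotomy d 0 with hd | hd | hd
    · nlinarith [mul_self_nonneg d]
    · subst hd
      have : PySem.Int.mod x 0 = x := by simp [PySem.Int.mod]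
      rw [this] at hmod
      omega
    · rcases (by omega : d = 1 ∨ 2 ≤ d) with hd1 | hd2
      · exfalso; apply hmod
        subst hd1
        rw [bp_mod_pos x 1 (by omega)]
        exact Int.emod_one x
      · nlinarith
  omega

def bpLooksPrimeAlt (x : Int) : Bool :=
  if x < 6 then true
  else if PySem.Int.mod x 2 = 0 then false
  else bpTrialAlt x 3

def backwards_prime_alt (start : Int) (stop : Int) : List Int :=
  let lo := if PySem.Int.mod start 2 == 0 then start + 1 else start
  (PySem.List.pyRange lo (stop + 1) 2).foldl (fun out n =>
    let s := PySem.Int.toStr n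
    match PySem.Str.pyGet? s 0 with
    | none => out  -- s[0] would raise IndexError; str(n) is never empty
    | some c =>
      -- c in '24568' : membership of the one-character slice in the literal
      if c == '2' || c == '4' || c == '5' || c == '6' || c == '8' then out  -- continue
      else
        match PySem.Str.slice? s none none (-1) with
        | none => out  -- unreachable (step -1 ≠ 0)
        | some rs =>
          match PySem.Int.ofStr? rs with
          | none => out  -- int() raises ValueError here; outside Pre_
          | some r =>
            if r ≠ n && bpLooksPrimeAlt n && bpLooksPrimeAlt r then out ++ [n] else out) []

-- ===== PRECONDITION & SPEC =====
-- Pre_ excludes exactly the inputs where the iterated range contains a negative number: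
-- there Python's int(str(number)[::-1]) raises ValueError (the reversed string ends in '-').
def Pre_backwards_prime (start : Int) (stop : Int) : Prop :=
  0 ≤ start ∨ stop < start ∨ (stop = start ∧ PySem.Int.mod start 2 = 0)
instance (start : Int) (stop : Int) : Decidable (Pre_backwards_prime start stop) := by unfold Pre_backwards_prime; infer_instance

def pvWitness_backwards_prime : Int × Int := (2, 100)

def Spec_backwards_prime (start : Int) (stop : Int) (out : List Int) : Prop := out = backwards_prime_alt start stop
instance (start : Int) (stop : Int) (out : List Int) : Decidable (Spec_backwards_prime start stop out) := by unfold Spec_backwards_prime; infer_instance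

-- ===== CLAIM (what is proved, stated in full; the proofs are below) =====
def Claim_equal_backwards_prime : Prop := ∀ (start : Int) (stop : Int), Dom_backwards_prime start stop → Pre_backwards_prime start stop → Spec_backwards_prime start stop (backwards_prime start stop)

-- ===== LEMMAS AND PROOFS =====

-- str(n) is never the empty string
theorem bp_toDigitsCore_ne_nil (b : Nat) : ∀ (fuel m : Nat) (ds : List Char),
    ds ≠ [] → Nat.toDigitsCore b fuel m ds ≠ [] := by
  intro fuel
  induction fuel with
  | zero => intro m ds h; simpa [Nat.toDigitsCore] using h
  | succ f ih =>
    intro m ds h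
    rw [Nat.toDigitsCore]
    split
    · simp
    · exact ih _ _ (by simp)

theorem bp_toChars_ne_nil (n : Int) : PySem.Int.toChars n ≠ [] := by
  unfold PySem.Int.toChars
  split
  · simp
  · unfold Nat.toDigits
    rw [Nat.toDigitsCore]
    split
    · simp
    · exact bp_toDigitsCore_ne_nil 10 _ _ _ (by simp)

-- startswith with a single-character prefix reads the head
theorem bp_startswith_singleton (c a : Char) (l : List Char) :
    PySem.Chars.startswith (a :: l) [c] = (a == c) := by
  simp [PySem.Chars.startswith, List.isPrefixOf]
  exact eq_comm

-- characterization of B's trial loop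
theorem bpTrialAlt_true_iff (x : Int) : ∀ (k : Nat) (d : Int), 1 ≤ d → (x - d).toNat ≤ k →
    (bpTrialAlt x d = true ↔
      ∀ e : Int, d ≤ e → e * e ≤ x → e % 2 = d % 2 → ¬ (e ∣ x)) := by
  intro k
  induction k using Nat.strong_induction_on with
  | _ k ih =>
    intro d hd1 hk
    rw [bpTrialAlt]
    split
    · rename_i hdx
      by_cases hdvd : PySem.Int.mod x d = 0
      · simp only [hdvd, if_true]
        constructor
        · intro h; cases h
        · intro h
          exact absurd ((PySem.Int.mod_eq_zero_iff_dvd x d).mp hdvd)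
            (h d le_rfl hdx rfl)
      · simp only [hdvd, if_false]
        have hxd1 : d + 1 ≤ x := by
          rcases (by omega : d = 1 ∨ 2 ≤ d) with h1 | h2
          · exfalso; apply hdvd
            subst h1
            rw [bp_mod_pos x 1 (by omega)]
            exact Int.emod_one x
          · nlinarith
        have hk1 : 1 ≤ k := by omega
        have hrec := ih (k - 1) (by omega) (d + 2) (by omega) (by omega)
        rw [hrec]
        constructor
        · intro h e hde hex hpar
          rcases (by omega : e = d ∨ d + 2 ≤ e) with he | he
          · subst he
            intro hcon
            exact hdvd ((PySem.Int.mod_eq_zero_iff_dvd x e).mpr hcon)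
          · exact h e he hex (by omega)
        · intro h e hde hex hpar
          exact h e (by omega) hex (by omega)
    · rename_i hdx
      constructor
      · intro _ e hde hex _
        exfalso
        have : d * d ≤ e * e := by nlinarith
        omega
      · intro _; rfl

-- characterization of A's trial scan
theorem bpIsPrimeA_eq_true_iff (x : Int) :
    (bpIsPrimeA x = true ↔ ∀ i : Int, 2 ≤ i → i < PySem.Int.floordiv x 2 → ¬ (i ∣ x)) := by
  unfold bpIsPrimeA
  rw [List.all_eq_true]
  constructor
  · intro h i h2 hi hdvd
    have hmem : i ∈ PySem.List.pyRange 2 (PySem.Int.floordiv x 2) 1 :=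
      (PySem.List.mem_pyRange_one).mpr ⟨h2, hi⟩
    have := h i hmem
    simp only [Bool.not_eq_eq_eq_not, Bool.not_true, beq_eq_false_iff_ne] at this
    exact this ((PySem.Int.mod_eq_zero_iff_dvd x i).mpr hdvd)
  · intro h i hmem
    have ⟨h2, hi⟩ := (PySem.List.mem_pyRange_one).mp hmem
    simp only [Bool.not_eq_eq_eq_not, Bool.not_true, beq_eq_false_iff_ne]
    intro hmod
    exact h i h2 hi ((PySem.Int.mod_eq_zero_iff_dvd x i).mp hmod)

-- the central fact: A's loose trial division and B's d*d-bounded one give the same verdicts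
theorem bp_prime_eq (x : Int) : bpIsPrimeA x = bpLooksPrimeAlt x := by
  unfold bpLooksPrimeAlt
  by_cases h6 : x < 6
  · simp only [h6, if_true]
    unfold bpIsPrimeA
    rw [PySem.List.pyRange_one_eq_nil (by
      rw [PySem.Int.floordiv_eq_ediv_of_pos (show (0:Int) < 2 by omega)]
      omega)]
    rfl
  · push_neg at h6
    simp only [show ¬ x < 6 by omega, if_false]
    have hfd : PySem.Int.floordiv x 2 = x / 2 := PySem.Int.floordiv_eq_ediv_of_pos (by omega)
    by_cases hev : PySem.Int.mod x 2 = 0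
    · simp only [hev, if_true]
      have h2dvd : (2 : Int) ∣ x := (PySem.Int.mod_eq_zero_iff_dvd x 2).mp hev
      rcases Bool.eq_false_or_eq_true (bpIsPrimeA x) with htrue | hfalse
      · exfalso
        refine (bpIsPrimeA_eq_true_iff x).mp htrue 2 le_rfl ?_ h2dvd
        rw [hfd]
        omega
      · exact hfalse
    · simp only [hev, if_false]
      have hodd : ¬ (2 : Int) ∣ x := fun hc => hev ((PySem.Int.mod_eq_zero_iff_dvd x 2).mpr hc)
      have hA := bpIsPrimeA_eq_true_iff x
      have hB := bpTrialAlt_true_iff x ((x - 3).toNat) 3 (by omega) le_rfl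
      have key : (∀ i : Int, 2 ≤ i → i < PySem.Int.floordiv x 2 → ¬ (i ∣ x)) ↔
          (∀ e : Int, 3 ≤ e → e * e ≤ x → e % 2 = 3 % 2 → ¬ (e ∣ x)) := by
        constructor
        · intro h e he3 hex _
          refine h e (by omega) ?_
          rw [hfd]
          have : 2 * e + 2 ≤ x := by nlinarith
          omega
        · intro h i hi2 hiub hidvd
          rw [hfd] at hiub
          have hix : 2 * i + 2 ≤ x := by omega
          have hiodd : i % 2 = 1 := by
            rcases Int.emod_two_eq i with h2 | h2
            · exact absurd (dvd_trans (Int.dvd_of_emod_eq_zero h2) hidvd) hodd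
            · exact h2
          by_cases hsq : i * i ≤ x
          · exact h i (by omega) hsq (by omega) hidvd
          · push_neg at hsq
            have hipos : (0 : Int) < i := by omega
            have hqi : x / i * i = x := Int.ediv_mul_cancel hidvd
            set q := x / i with hqdef
            have hq2 : 2 ≤ q := by nlinarith
            have hqlt : q < i := by nlinarith
            have hqq : q * q ≤ x := by nlinarith
            have hqdvd : q ∣ x := ⟨i, by linarith [hqi]⟩
            have hqodd : q % 2 = 1 := by
              rcases Int.emod_two_eq q with h2 | h2
              · exact absurd (dvd_trans (Int.dvd_of_emod_eq_zero h2) hqdvd) hodd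
              · exact h2
            exact h q (by omega) hqq (by omega) hqdvd
      have hiff : bpIsPrimeA x = true ↔ bpTrialAlt x 3 = true := hA.trans (key.trans hB.symm)
      cases ha : bpIsPrimeA x <;> cases hb : bpTrialAlt x 3 <;> simp_all

-- the two loop bodies agree on every iterate
theorem bp_body_eq (acc : List Int) (n : Int) :
    (if PySem.Str.startswith (PySem.Int.toStr n) "2"
        || PySem.Str.startswith (PySem.Int.toStr n) "4"
        || PySem.Str.startswith (PySem.Int.toStr n) "5"
        || PySem.Str.startswith (PySem.Int.toStr n) "6"
        || PySem.Str.startswith (PySem.Int.toStr n) "8" then acc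
     else
      if bpIsPrimeA n then
        match PySem.Str.slice? (PySem.Int.toStr n) none none (-1) with
        | none => acc
        | some rs =>
          match PySem.Int.ofStr? rs with
          | none => acc
          | some reverse =>
            if n ≠ reverse then
              (if bpIsPrimeA reverse then acc ++ [n] else acc)
            else acc
      else acc) =
    (let s := PySem.Int.toStr n
     match PySem.Str.pyGet? s 0 with
     | none => acc
     | some c =>
       if c == '2' || c == '4' || c == '5' || c == '6' || c == '8' then acc
       else
         match PySem.Str.slice? s none none (-1) with
         | none => acc
         | some rs =>
           match PySem.Int.ofStr? rs with
           | none => acc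
           | some r =>
             if r ≠ n && bpLooksPrimeAlt n && bpLooksPrimeAlt r then acc ++ [n] else acc) := by
  obtain ⟨a, l, hs⟩ : ∃ a l, (PySem.Int.toStr n).toList = a :: l := by
    have h := bp_toChars_ne_nil n
    rw [← PySem.Int.toList_toStr] at h
    cases hc : (PySem.Int.toStr n).toList with
    | nil => exact absurd hc h
    | cons a l => exact ⟨a, l, rfl⟩
  have hget : PySem.Str.pyGet? (PySem.Int.toStr n) 0 = some a := by
    rw [show (0 : Int) = ((0 : Nat) : Int) from rfl, PySem.Str.pyGet?_natCast, hs]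
    rfl
  have hsw : ∀ c : Char, PySem.Str.startswith (PySem.Int.toStr n) (String.ofList [c]) = (a == c) := by
    intro c
    simp only [PySem.Str.startswith, String.toList_ofList, hs]
    rw [bp_startswith_singleton]
  simp only [hget]
  rw [show ("2" : String) = String.ofList ['2'] by simp, show ("4" : String) = String.ofList ['4'] by simp,
    show ("5" : String) = String.ofList ['5'] by simp, show ("6" : String) = String.ofList ['6'] by simp,
    show ("8" : String) = String.ofList ['8'] by simp]
  simp only [hsw]
  by_cases hbad : (a == '2' || a == '4' || a == '5' || a == '6' || a == '8') = true
  · rw [if_pos hbad, if_pos hbad]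
  · rw [if_neg hbad, if_neg hbad]
    cases PySem.Str.slice? (PySem.Int.toStr n) none none (-1) with
    | none => simp
    | some rs =>
      dsimp only
      cases PySem.Int.ofStr? rs with
      | none => simp
      | some r =>
        dsimp only
        rw [bp_prime_eq n, bp_prime_eq r]
        by_cases hne : n = r
        · subst hne
          simp
        · rw [if_pos hne]
          by_cases hp : bpLooksPrimeAlt n = true
          · by_cases hq : bpLooksPrimeAlt r = true
            · simp [hp, hq, hne, Ne.symm hne]
            · simp only [Bool.not_eq_true] at hq
              simp [hp, hq]
          · simp only [Bool.not_eq_true] at hp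
            simp [hp]

-- ===== VERDICT (by name: the statement is the Claim_ definition above) =====
theorem backwards_prime_spec : Claim_equal_backwards_prime := by
  intro start stop _ _
  show backwards_prime start stop = backwards_prime_alt start stop
  unfold backwards_prime backwards_prime_alt
  dsimp only
  congr 1
  funext acc n
  exact bp_body_eq acc n
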